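-- pv_equiv track=rewrite | github.com/Ryukijano/2026-NVIDIA | team-submissions/selnc_quantum.py | compute_topology_overlaps
-- ===== SOURCE A (Python) =====
-- from typing import List, Tuple, Dict, Optional
--
-- def compute_topology_overlaps(G2: List, G4: List) -> Dict:
--     """Compute topological invariants for Gamma calculation."""
--     def count_matches(list_a, list_b):
--         set_b = set(tuple(sorted(x)) for x in list_b)
--         return sum(1 for item in list_a if tuple(sorted(item)) in set_b)
--
--     return {
--         '22': count_matches(G2, G2),
--         '44': count_matches(G4, G4),
--         '24': 0
--     }
-- ===== SOURCE B (Python) =====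
-- def compute_topology_overlaps(G2, G4):
--     """Self-overlap of a list with itself is its length: every sorted tuple of an
--     element is trivially in the set of sorted tuples of the same list."""
--     return {'22': len(G2), '44': len(G4), '24': 0}
-- ===== Notes on version B (the rewrite author's own statement) =====
-- stated objective: faster
-- what changed: A builds a set of sorted tuples and counts members of the same list found in it; since every element's sorted tuple is by construction in that set, the self-match count is just the list length, so B returns {'22': len(G2), '44': len(G4), '24': 0} with no sorting or set at all.
import Mathlib
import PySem

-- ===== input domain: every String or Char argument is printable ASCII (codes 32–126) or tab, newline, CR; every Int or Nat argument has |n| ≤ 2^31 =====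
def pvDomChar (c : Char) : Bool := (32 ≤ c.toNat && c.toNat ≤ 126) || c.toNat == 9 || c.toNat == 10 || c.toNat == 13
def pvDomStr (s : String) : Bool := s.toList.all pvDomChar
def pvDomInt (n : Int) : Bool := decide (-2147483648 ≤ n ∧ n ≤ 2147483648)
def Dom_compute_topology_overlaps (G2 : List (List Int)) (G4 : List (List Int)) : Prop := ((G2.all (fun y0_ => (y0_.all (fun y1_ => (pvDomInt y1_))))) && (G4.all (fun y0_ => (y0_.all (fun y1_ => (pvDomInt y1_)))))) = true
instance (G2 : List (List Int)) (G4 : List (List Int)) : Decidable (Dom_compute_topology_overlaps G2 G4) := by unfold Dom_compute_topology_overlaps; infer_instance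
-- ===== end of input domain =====

-- ===== PORT A =====
-- count_matches(list_a, list_b): set of sorted tuples of list_b, count members of list_a in it
def pvCountMatches (list_a list_b : List (List Int)) : Int :=
  let set_b : PySem.Set (List Int) :=
    PySem.Set.ofList (list_b.map (fun x => PySem.List.sorted x (fun y => y) false))
  list_a.foldl
    (fun acc item =>
      if PySem.Set.contains set_b (PySem.List.sorted item (fun y => y) false) then acc + 1 else acc)
    0

def compute_topology_overlaps (G2 : List (List Int)) (G4 : List (List Int)) : List (String × Int) :=
  [("22", pvCountMatches G2 G2), ("44", pvCountMatches G4 G4), ("24", 0)]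

-- ===== PORT B =====
-- B: the self-match count is the list length; no sorting, no set
def compute_topology_overlaps_alt (G2 : List (List Int)) (G4 : List (List Int)) : List (String × Int) :=
  [("22", (G2.length : Int)), ("44", (G4.length : Int)), ("24", 0)]

-- ===== PRECONDITION & SPEC =====
def Spec_compute_topology_overlaps (G2 : List (List Int)) (G4 : List (List Int)) (out : List (String × Int)) : Prop := out = compute_topology_overlaps_alt G2 G4
instance (G2 : List (List Int)) (G4 : List (List Int)) (out : List (String × Int)) : Decidable (Spec_compute_topology_overlaps G2 G4 out) := by unfold Spec_compute_topology_overlaps; infer_instance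

-- ===== CLAIM (what is proved, stated in full; the proofs are below) =====
def Claim_equal_compute_topology_overlaps : Prop := ∀ (G2 : List (List Int)) (G4 : List (List Int)), Dom_compute_topology_overlaps G2 G4 → Spec_compute_topology_overlaps G2 G4 (compute_topology_overlaps G2 G4)

-- ===== LEMMAS AND PROOFS =====

-- ===== VERDICT (by name: the statement is the Claim_ definition above) =====
-- every element of l hits the set built from l itself, so the count is l.length
theorem pvFoldl_count_all {l : List (List Int)}
    (p : List Int → Bool) (h : ∀ x ∈ l, p x = true) :
    ∀ acc : Int, l.foldl (fun acc item => if p item then acc + 1 else acc) acc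
      = acc + l.length := by
  induction l with
  | nil => intro acc; simp
  | cons x t ih =>
    intro acc
    have hx := h x (List.mem_cons_self)
    simp only [List.foldl, hx, if_pos]
    rw [ih (fun y hy => h y (List.mem_cons_of_mem _ hy))]
    simp [List.length_cons]; ring

theorem pvCountMatches_self (l : List (List Int)) : pvCountMatches l l = l.length := by
  unfold pvCountMatches
  rw [pvFoldl_count_all]
  · simp
  · intro x hx
    rw [PySem.Set.contains_iff, PySem.Set.mem_ofList]
    exact List.mem_map_of_mem hx

theorem compute_topology_overlaps_spec : Claim_equal_compute_topology_overlaps := by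
  intro G2 G4 _
  unfold Spec_compute_topology_overlaps compute_topology_overlaps compute_topology_overlaps_alt
  rw [pvCountMatches_self, pvCountMatches_self]
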